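-- pv_equiv track=rewrite | github.com/emavgl/discriminate-posed-spontaneous-smile | 2 Features Extraction/features_extraction.py | find_longest_negative_sequence
-- ===== SOURCE A (Python) =====
-- def find_longest_negative_sequence(arr):
--     """
--     returns the start frame and the last frame of
--     the longest sequence of consecutive negative segments
--     """
--     sequences = []
--     sequence = 0
--     indexes = []
--     first_index = None
--     last_index = None
--     for i, element in enumerate(arr):
-- #        if element < 0 and i > limit:
--         if element < 0:
--             if first_index == None: first_index = i
--             sequence += 1
--         elif sequence > 0:
--             last_index = i
--             sequences.append(sequence)
--             indexes.append((first_index, last_index))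
--             sequence = 0
--             first_index = None
--
--     max_sequence = max(sequences)
--     max_index = sequences.index(max_sequence)
--     return indexes[max_index]
-- ===== SOURCE B (Python) =====
-- def find_longest_negative_sequence(arr):
--     """
--     returns the start frame and the last frame of
--     the longest sequence of consecutive negative segments
--     """
--     start = None
--     best_len = 0
--     best_range = None
--     for i, x in enumerate(arr):
--         if x < 0:
--             if start is None:
--                 start = i
--         else:
--             if start is not None:
--                 if i - start > best_len:
--                     best_len = i - start
--                     best_range = (start, i)
--                 start = None
--     if best_range is None:
--         raise ValueError("no closed negative run")
--     return best_range
-- ===== Notes on version B (the rewrite author's own statement) =====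
-- stated objective: simpler
-- what changed: A accumulates parallel lists of run lengths and index pairs and then makes three post-loop passes (max, index, lookup); B keeps a single running best (start, best_len, best_range) in one pass with strict > preserving A's first-maximum tie-breaking, and no trailing run is closed, matching A.
import Mathlib
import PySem

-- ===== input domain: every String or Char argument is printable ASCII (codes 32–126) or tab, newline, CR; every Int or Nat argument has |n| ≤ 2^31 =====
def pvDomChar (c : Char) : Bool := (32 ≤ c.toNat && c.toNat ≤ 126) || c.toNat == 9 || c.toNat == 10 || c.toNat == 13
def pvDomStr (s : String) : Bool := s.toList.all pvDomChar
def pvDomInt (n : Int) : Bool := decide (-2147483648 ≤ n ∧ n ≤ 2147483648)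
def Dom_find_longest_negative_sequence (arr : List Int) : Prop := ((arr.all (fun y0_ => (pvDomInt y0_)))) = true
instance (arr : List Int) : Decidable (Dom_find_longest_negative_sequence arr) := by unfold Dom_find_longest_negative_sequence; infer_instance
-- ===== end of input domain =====

-- B replaces A's three accumulated tables plus the post-loop max/index/lookup passes by a
-- single-pass running best (same values, same first-max tie-breaking); objective: simpler.

-- ===== PORT A =====
-- state: (sequences, sequence, indexes, first_index, last_index)
def pvStepA (st : List Int × Int × List (Int × Int) × Option Int × Option Int)
    (p : Int × Int) : List Int × Int × List (Int × Int) × Option Int × Option Int :=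
  let (sequences, sequence, indexes, first_index, last_index) := st
  let (i, element) := p
  if element < 0 then
    let first_index := if first_index = none then some i else first_index
    (sequences, sequence + 1, indexes, first_index, last_index)
  else if sequence > 0 then
    let last_index := some i
    (sequences ++ [sequence], 0, indexes ++ [(first_index.getD 0, last_index.getD 0)],
      none, last_index)
  else st

-- post-loop passes of A: max(sequences), sequences.index(...), indexes[...]
def pvFinishA (st : List Int × Int × List (Int × Int) × Option Int × Option Int) : Int × Int :=
  match PySem.List.max? st.1 (fun y => y) with
  | none => (0, 0)      -- Python raises ValueError (max of empty list); excluded by Pre_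
  | some max_sequence =>
    match PySem.List.index? st.1 max_sequence with
    | none => (0, 0)    -- unreachable: max? returns a member
    | some max_index => (PySem.List.pyGet? st.2.2.1 (max_index : Int)).getD (0, 0)

def find_longest_negative_sequence (arr : List Int) : Int × Int :=
  pvFinishA ((PySem.List.enumerate arr).foldl pvStepA ([], 0, [], none, none))

-- ===== PORT B =====
-- state: (start, best_len, best_range)
def pvStepB (st : Option Int × Int × Option (Int × Int)) (p : Int × Int) :
    Option Int × Int × Option (Int × Int) :=
  let (start, best_len, best_range) := st
  let (i, x) := p
  if x < 0 then
    if start = none then (some i, best_len, best_range) else st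
  else
    match start with
    | some s =>
      if i - s > best_len then (none, i - s, some (s, i)) else (none, best_len, best_range)
    | none => st

def find_longest_negative_sequence_alt (arr : List Int) : Int × Int :=
  match ((PySem.List.enumerate arr).foldl pvStepB (none, 0, none)).2.2 with
  | none => (0, 0)      -- Python raises ValueError here; excluded by Pre_
  | some best_range => best_range

-- ===== PRECONDITION & SPEC =====
-- Pre_: some negative element is followed (later in the list) by a non-negative one, i.e. at
-- least one negative run is closed; otherwise A's `max([])` raises ValueError (B also raises).
def Pre_find_longest_negative_sequence (arr : List Int) : Prop :=
  ∃ i < arr.length, ∃ j < arr.length, i < j ∧ arr[i]! < 0 ∧ 0 ≤ arr[j]!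
instance (arr : List Int) : Decidable (Pre_find_longest_negative_sequence arr) := by
  unfold Pre_find_longest_negative_sequence; infer_instance

def pvWitness_find_longest_negative_sequence : List Int := [-1, 0]

def Spec_find_longest_negative_sequence (arr : List Int) (out : Int × Int) : Prop := out = find_longest_negative_sequence_alt arr
instance (arr : List Int) (out : Int × Int) : Decidable (Spec_find_longest_negative_sequence arr out) := by unfold Spec_find_longest_negative_sequence; infer_instance

-- ===== CLAIM (what is proved, stated in full; the proofs are below) =====
def Claim_equal_find_longest_negative_sequence : Prop := ∀ (arr : List Int), Dom_find_longest_negative_sequence arr → Pre_find_longest_negative_sequence arr → Spec_find_longest_negative_sequence arr (find_longest_negative_sequence arr)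

-- ===== LEMMAS AND PROOFS =====

-- the running best of B is the first-maximum of A's accumulated tables
def pvBest (seqs : List Int) (idxs : List (Int × Int)) (bl : Int)
    (best : Option (Int × Int)) : Prop :=
  match best with
  | none => seqs = [] ∧ bl = 0
  | some p => 0 < bl ∧ ∃ k : Nat, k < seqs.length ∧ seqs[k]? = some bl ∧ idxs[k]? = some p ∧
      (∀ j : Nat, j < k → ∀ v, seqs[j]? = some v → v < bl) ∧
      (∀ v ∈ seqs, v ≤ bl)

def pvInv (n : Int) (stA : List Int × Int × List (Int × Int) × Option Int × Option Int)
    (stB : Option Int × Int × Option (Int × Int)) : Prop :=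
  stA.2.2.2.1 = stB.1 ∧
  (match stB.1 with
   | some s => s < n ∧ stA.2.1 = n - s
   | none => stA.2.1 = 0) ∧
  stA.2.2.1.length = stA.1.length ∧
  pvBest stA.1 stA.2.2.1 stB.2.1 stB.2.2

theorem pvBest_le (seqs : List Int) (idxs : List (Int × Int)) (bl : Int)
    (best : Option (Int × Int)) (h : pvBest seqs idxs bl best) :
    ∀ v ∈ seqs, v ≤ bl := by
  cases best with
  | none => obtain ⟨h1, -⟩ := h; simp [h1]
  | some p => obtain ⟨-, k, hk, hsk, hik, hlt, hle⟩ := h; exact hle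

theorem pvBest_append_gt (seqs : List Int) (idxs : List (Int × Int)) (bl : Int)
    (best : Option (Int × Int)) (h : pvBest seqs idxs bl best)
    (hlen : idxs.length = seqs.length) (c : Int) (pr : Int × Int) (hc : 0 < c)
    (hcb : bl < c) : pvBest (seqs ++ [c]) (idxs ++ [pr]) c (some pr) := by
  simp only [pvBest]
  refine ⟨hc, seqs.length, by simp, by simp, by rw [← hlen]; simp, ?_, ?_⟩
  · intro j hj w hw
    rw [List.getElem?_append_left hj] at hw
    exact (pvBest_le seqs idxs bl best h w (List.mem_of_getElem? hw)).trans_lt hcb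
  · intro v hv
    rcases List.mem_append.mp hv with hv | hv
    · exact (pvBest_le seqs idxs bl best h v hv).trans hcb.le
    · simp at hv; omega

theorem pvBest_append_le (seqs : List Int) (idxs : List (Int × Int)) (bl : Int)
    (p : Int × Int) (h : pvBest seqs idxs bl (some p))
    (hlen : idxs.length = seqs.length) (c : Int) (pr : Int × Int)
    (hcb : c ≤ bl) : pvBest (seqs ++ [c]) (idxs ++ [pr]) bl (some p) := by
  obtain ⟨hbl, k, hk, hsk, hik, hlt, hle⟩ := h
  simp only [pvBest]
  refine ⟨hbl, k, by simp; omega, ?_, ?_, ?_, ?_⟩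
  · rw [List.getElem?_append_left hk]; exact hsk
  · rw [List.getElem?_append_left (by omega : k < idxs.length)]; exact hik
  · intro j hj w hw
    rw [List.getElem?_append_left (by omega : j < seqs.length)] at hw
    exact hlt j hj w hw
  · intro v hv
    rcases List.mem_append.mp hv with hv | hv
    · exact hle v hv
    · simp at hv; omega

theorem pvStep_inv (n : Int) (stA : List Int × Int × List (Int × Int) × Option Int × Option Int)
    (stB : Option Int × Int × Option (Int × Int)) (x : Int) (h : pvInv n stA stB) :
    pvInv (n + 1) (pvStepA stA (n, x)) (pvStepB stB (n, x)) := by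
  obtain ⟨seqs, seq, idxs, fi, li⟩ := stA
  obtain ⟨start, bl, best⟩ := stB
  obtain ⟨h1, h2, h3, h4⟩ := h
  simp only at h1 h2 h3 h4
  subst h1
  by_cases hx : x < 0
  · cases fi with
    | none =>
      simp only at h2
      refine ⟨by simp [pvStepA, pvStepB, hx], ?_, by simpa [pvStepA, pvStepB, hx] using h3,
        by simpa [pvStepA, pvStepB, hx] using h4⟩
      simp [pvStepA, pvStepB, hx]; omega
    | some s =>
      simp only at h2
      refine ⟨by simp [pvStepA, pvStepB, hx], ?_, by simpa [pvStepA, pvStepB, hx] using h3,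
        by simpa [pvStepA, pvStepB, hx] using h4⟩
      simp [pvStepA, pvStepB, hx]; omega
  · cases fi with
    | none =>
      simp only at h2
      refine ⟨by simp [pvStepA, pvStepB, hx, h2], by simp [pvStepA, pvStepB, hx, h2], by simp [pvStepA, hx, h2, h3], ?_⟩
      simpa [pvStepA, pvStepB, hx, h2] using h4
    | some s =>
      simp only at h2
      have hseq : seq > 0 := by omega
      have hstep : pvStepA (seqs, seq, idxs, some s, li) (n, x) =
          (seqs ++ [seq], 0, idxs ++ [(s, n)], none, some n) := by
        simp [pvStepA, hx, hseq]
      rw [hstep]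
      by_cases hgt : n - s > bl
      · have hstepB : pvStepB (some s, bl, best) (n, x) = (none, n - s, some (s, n)) := by
          simp [pvStepB, hx, hgt]
        rw [hstepB]
        refine ⟨rfl, rfl, by simp [h3], ?_⟩
        have := pvBest_append_gt seqs idxs bl best h4 h3 seq (s, n) (by omega) (by omega)
        simpa [h2.2] using this
      · have hstepB : pvStepB (some s, bl, best) (n, x) = (none, bl, best) := by
          simp [pvStepB, hx, hgt]
        rw [hstepB]
        refine ⟨rfl, rfl, by simp [h3], ?_⟩
        cases best with
        | none =>
          obtain ⟨-, hbl⟩ := h4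
          omega
        | some p =>
          have := pvBest_append_le seqs idxs bl p h4 h3 seq (s, n) (by omega)
          simpa [h2.2] using this

theorem pvFold_inv (arr : List Int) (n : Int)
    (stA : List Int × Int × List (Int × Int) × Option Int × Option Int)
    (stB : Option Int × Int × Option (Int × Int)) (h : pvInv n stA stB) :
    pvInv (n + arr.length) ((PySem.List.enumerate arr n).foldl pvStepA stA)
      ((PySem.List.enumerate arr n).foldl pvStepB stB) := by
  induction arr generalizing n stA stB with
  | nil => simpa [PySem.List.enumerate_nil] using h
  | cons x xs ih =>
    have this := ih (n + 1) _ _ (pvStep_inv n stA stB x h)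
    have harith : n + 1 + (xs.length : Int) = n + ((x :: xs).length : Int) := by
      simp; ring
    rw [harith] at this
    simpa [PySem.List.enumerate_cons] using this

-- B's running best is the first element of A's tables attaining the maximum
theorem pvIndexFirst (l : List Int) (k : Nat) (v : Int) (h : k < l.length)
    (hv : l[k]? = some v) (hlt : ∀ j : Nat, j < k → ∀ w, l[j]? = some w → w < v) :
    PySem.List.index? l v = some k := by
  rw [PySem.List.index?_eq_some_iff]
  have hv' : l[k] = v := by simpa [List.getElem?_eq_getElem h] using hv
  refine ⟨l.take k, l.drop (k + 1), ?_, by simp [h.le], ?_⟩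
  · rw [← hv', ← List.drop_eq_getElem_cons h, List.take_append_drop]
  · intro hm
    obtain ⟨j, hj, hjv⟩ := List.mem_iff_getElem.mp hm
    have hjl : j < l.length := by simp at hj; omega
    have hjk : j < k := by simp at hj; omega
    have hjval : (l.take k)[j] = l[j] := List.getElem_take ..
    exact absurd (hjval ▸ hjv) (ne_of_lt (hlt j hjk l[j] (List.getElem?_eq_getElem hjl)))

theorem pvFinal (st : List Int × Int × List (Int × Int) × Option Int × Option Int) (bl : Int)
    (best : Option (Int × Int)) (hlen : st.2.2.1.length = st.1.length)
    (hb : pvBest st.1 st.2.2.1 bl best) :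
    pvFinishA st =
    (match best with | none => ((0 : Int), (0 : Int)) | some p => p) := by
  obtain ⟨seqs, seq, idxs, fi, li⟩ := st
  simp only at hlen hb ⊢
  cases best with
  | none =>
    obtain ⟨h1, -⟩ := hb
    subst h1
    unfold pvFinishA
    rw [show PySem.List.max? ([] : List Int) (fun y => y) = none from
      (PySem.List.max?_eq_none_iff ..).mpr rfl]
  | some p =>
    obtain ⟨hbl, k, hk, hsk, hik, hlt, hle⟩ := hb
    have hmem : bl ∈ seqs := List.mem_of_getElem? hsk
    have hne : seqs ≠ [] := by rintro rfl; simp at hk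
    obtain ⟨m, hm⟩ : ∃ m, PySem.List.max? seqs (fun y => y) = some m := by
      cases hmax : PySem.List.max? seqs (fun y => y) with
      | none => exact absurd ((PySem.List.max?_eq_none_iff seqs _).mp hmax) hne
      | some m => exact ⟨m, rfl⟩
    have hmbl : m = bl :=
      le_antisymm (hle m (PySem.List.max?_mem hm)) (PySem.List.max?_isMax hm bl hmem)
    subst hmbl
    have hidx := pvIndexFirst seqs k m hk hsk hlt
    unfold pvFinishA
    simp only [hm, hidx, PySem.List.pyGet?_natCast, hik, Option.getD_some]

-- ===== VERDICT (by name: the statement is the Claim_ definition above) =====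
theorem find_longest_negative_sequence_spec : Claim_equal_find_longest_negative_sequence := by
  intro arr _ _
  unfold Spec_find_longest_negative_sequence
  have h := pvFold_inv arr 0 ([], 0, [], none, none) (none, 0, none)
    ⟨rfl, rfl, rfl, rfl, rfl⟩
  obtain ⟨-, -, hlen, hb⟩ := h
  unfold find_longest_negative_sequence find_longest_negative_sequence_alt
  cases hbest : ((PySem.List.enumerate arr).foldl pvStepB (none, 0, none)).2.2 with
  | none => rw [hbest] at hb; simpa using pvFinal _ _ none hlen hb
  | some p => rw [hbest] at hb; simpa using pvFinal _ _ (some p) hlen hb
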